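-- pv_equiv track=rewrite | github.com/YuliaVyaznikova/CompLing | realization/ontology_rag/markup_loader.py | _deduplicate_overlapping
-- ===== SOURCE A (Python) =====
-- from typing import Dict, List, Tuple
--
-- def _deduplicate_overlapping(fragments: List[str]) -> List[str]:
--     normalized = [(" ".join(f.split()), f) for f in fragments]
--     normalized.sort(key=lambda x: len(x[0]), reverse=True)
--     result = []
--     for norm, orig in normalized:
--         dominated = False
--         for longer_norm, _ in result:
--             if norm in longer_norm and norm != longer_norm:
--                 dominated = True
--                 break
--         if not dominated:
--             result.append((norm, orig))
--     return [orig for _, orig in result]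
-- ===== SOURCE B (Python) =====
-- def _deduplicate_overlapping(fragments):
--     pairs = [(" ".join(f.split()), f) for f in fragments]
--     norms = [n for n, _ in pairs]
--     pairs.sort(key=lambda x: len(x[0]), reverse=True)
--     return [orig for norm, orig in pairs
--             if not any(len(m) > len(norm) and norm in m for m in norms)]
-- ===== Notes on version B (the rewrite author's own statement) =====
-- stated objective: alternative
-- what changed: A's stateful loop (each candidate scanned against the incrementally built list of already-kept survivors) is replaced by a stateless filter: each fragment is kept iff its normalized form is a proper substring of no normalized form in the whole precomputed list, which is provably the same set; the proper-substring test becomes a strict length comparison plus containment instead of containment plus inequality.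
import Mathlib
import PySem

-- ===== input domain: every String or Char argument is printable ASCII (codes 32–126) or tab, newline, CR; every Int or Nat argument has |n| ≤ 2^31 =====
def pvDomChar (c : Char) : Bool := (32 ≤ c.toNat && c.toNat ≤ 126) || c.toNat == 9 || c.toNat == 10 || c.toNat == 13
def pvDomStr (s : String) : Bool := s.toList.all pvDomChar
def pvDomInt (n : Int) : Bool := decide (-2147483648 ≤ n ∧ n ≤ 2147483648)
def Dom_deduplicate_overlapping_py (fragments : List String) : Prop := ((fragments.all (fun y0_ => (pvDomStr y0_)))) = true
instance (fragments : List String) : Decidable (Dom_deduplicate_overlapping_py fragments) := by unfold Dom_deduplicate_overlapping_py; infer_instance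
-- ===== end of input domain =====

-- B replaces A's stateful loop (inner scan over the already-kept survivors) by a stateless
-- filter against the precomputed list of all normalized forms; alternative decomposition, same cost.

-- ===== PORT A =====
def deduplicate_overlapping_py (fragments : List String) : List String :=
  let normalized := fragments.map (fun f => (PySem.Str.join " " (PySem.Str.split₀ f), f))
  let normalized := PySem.List.sorted normalized (fun x => PySem.Str.len x.1) true
  let result := normalized.foldl
    (fun result p =>
      let dominated := result.any (fun q => PySem.Str.isIn p.1 q.1 && p.1 != q.1)
      if dominated then result else result ++ [p])
    ([] : List (String × String))
  result.map (fun q => q.2)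

-- ===== PORT B =====
def deduplicate_overlapping_py_alt (fragments : List String) : List String :=
  let pairs := fragments.map (fun f => (PySem.Str.join " " (PySem.Str.split₀ f), f))
  let norms := pairs.map (fun p => p.1)
  let sortedPairs := PySem.List.sorted pairs (fun x => PySem.Str.len x.1) true
  (sortedPairs.filter (fun p =>
      !(norms.any (fun m => decide (PySem.Str.len p.1 < PySem.Str.len m) && PySem.Str.isIn p.1 m)))).map
    (fun p => p.2)

-- ===== PRECONDITION & SPEC =====
def Spec_deduplicate_overlapping_py (fragments : List String) (out : List String) : Prop := out = deduplicate_overlapping_py_alt fragments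
instance (fragments : List String) (out : List String) : Decidable (Spec_deduplicate_overlapping_py fragments out) := by unfold Spec_deduplicate_overlapping_py; infer_instance

-- ===== CLAIM (what is proved, stated in full; the proofs are below) =====
def Claim_equal_deduplicate_overlapping_py : Prop := ∀ (fragments : List String), Dom_deduplicate_overlapping_py fragments → Spec_deduplicate_overlapping_py fragments (deduplicate_overlapping_py fragments)

-- ===== LEMMAS AND PROOFS =====

-- "n is a proper substring of m" (on normalized strings)
def PDom (n m : String) : Prop := n.toList.length < m.toList.length ∧ n.toList <:+: m.toList

-- B's keep-test as a named predicate (definitionally B's filter condition)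
def goodb (norms : List String) (n : String) : Bool :=
  !(norms.any (fun m => decide (PySem.Str.len n < PySem.Str.len m) && PySem.Str.isIn n m))

-- A's loop step as a named function (definitionally A's foldl body)
def stepA (result : List (String × String)) (p : String × String) : List (String × String) :=
  let dominated := result.any (fun q => PySem.Str.isIn p.1 q.1 && p.1 != q.1)
  if dominated then result else result ++ [p]

-- A's inner test ("substring and different") coincides with B's ("substring and strictly shorter")
lemma propercond (n m : String) :
    (PySem.Str.isIn n m && n != m) = (decide (PySem.Str.len n < PySem.Str.len m) && PySem.Str.isIn n m) := by
  cases h : PySem.Str.isIn n m with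
  | false => simp
  | true =>
    have hinf : n.toList <:+: m.toList := (PySem.Str.isIn_iff_infix n m).1 h
    have hle : n.toList.length ≤ m.toList.length := hinf.sublist.length_le
    simp only [Bool.true_and, Bool.and_true]
    by_cases hnm : n = m
    · subst hnm; simp
    · have hne : n.toList ≠ m.toList := fun he => hnm (String.toList_inj.mp he)
      have hlt : n.toList.length < m.toList.length :=
        Nat.lt_of_le_of_ne hle (fun he => hne (hinf.sublist.eq_of_length he))
      have h1 : (n != m) = true := bne_iff_ne.mpr hnm
      have h2 : decide (PySem.Str.len n < PySem.Str.len m) = true := by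
        rw [decide_eq_true_eq, PySem.Str.len_eq, PySem.Str.len_eq]
        exact_mod_cast hlt
      rw [h1, h2]

-- B's elementary test decides PDom
lemma cond_iff (n m : String) :
    (decide (PySem.Str.len n < PySem.Str.len m) && PySem.Str.isIn n m) = true ↔ PDom n m := by
  rw [Bool.and_eq_true, decide_eq_true_eq, PySem.Str.len_eq, PySem.Str.len_eq]
  unfold PDom
  constructor
  · rintro ⟨h1, h2⟩
    exact ⟨by exact_mod_cast h1, (PySem.Str.isIn_iff_infix _ _).1 h2⟩
  · rintro ⟨h1, h2⟩
    exact ⟨by exact_mod_cast h1, (PySem.Str.isIn_iff_infix _ _).2 h2⟩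

lemma goodb_iff (norms : List String) (n : String) :
    goodb norms n = true ↔ ∀ m ∈ norms, ¬ PDom n m := by
  rw [goodb, Bool.not_eq_true', List.any_eq_false]
  constructor
  · intro h m hm hd
    exact h m hm ((cond_iff n m).2 hd)
  · intro h m hm hc
    exact h m hm ((cond_iff n m).1 hc)

lemma exists_max_len (l : List String) (h : l ≠ []) :
    ∃ a ∈ l, ∀ b ∈ l, b.toList.length ≤ a.toList.length := by
  induction l with
  | nil => exact absurd rfl h
  | cons x xs ih =>
    cases xs with
    | nil => exact ⟨x, List.mem_singleton.2 rfl, by simp⟩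
    | cons y ys =>
      obtain ⟨a, ha, hmax⟩ := ih (by simp)
      by_cases hle : x.toList.length ≤ a.toList.length
      · refine ⟨a, List.mem_cons_of_mem _ ha, ?_⟩
        intro b hb
        rcases List.mem_cons.1 hb with rfl | hb
        · exact hle
        · exact hmax b hb
      · refine ⟨x, List.mem_cons_self, ?_⟩
        intro b hb
        rcases List.mem_cons.1 hb with rfl | hb
        · exact Nat.le_refl _
        · exact Nat.le_trans (hmax b hb) (Nat.le_of_not_le hle)

-- among all norms properly containing n there is a maximal one, itself undominated
lemma exists_undominated_superstring (norms : List String) (n : String)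
    (h : ∃ m ∈ norms, PDom n m) :
    ∃ m' ∈ norms, PDom n m' ∧ ∀ m'' ∈ norms, ¬ PDom m' m'' := by
  have hmemF : ∀ m, m ∈ norms.filter (fun m => decide (PySem.Str.len n < PySem.Str.len m) && PySem.Str.isIn n m) ↔ m ∈ norms ∧ PDom n m := by
    intro m; rw [List.mem_filter, cond_iff]
  obtain ⟨m, hm, hd⟩ := h
  obtain ⟨a, haF, hamax⟩ := exists_max_len (norms.filter (fun m => decide (PySem.Str.len n < PySem.Str.len m) && PySem.Str.isIn n m)) (by
    intro hnil
    have hmF := (hmemF m).2 ⟨hm, hd⟩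
    rw [hnil] at hmF
    exact absurd hmF List.not_mem_nil)
  obtain ⟨haN, haD⟩ := (hmemF a).1 haF
  refine ⟨a, haN, haD, ?_⟩
  rintro m'' hm'' ⟨hlt, hinf⟩
  have hmF : m'' ∈ norms.filter (fun m => decide (PySem.Str.len n < PySem.Str.len m) && PySem.Str.isIn n m) :=
    (hmemF m'').2 ⟨hm'', ⟨Nat.lt_trans haD.1 hlt, haD.2.trans hinf⟩⟩
  exact Nat.lt_irrefl _ (Nat.lt_of_lt_of_le hlt (hamax m'' hmF))

-- the loop invariant: A's fold equals the stateless filter by goodb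
lemma loop_eq (norms : List String) :
    ∀ (L acc : List (String × String)),
      (∀ q ∈ acc, q.1 ∈ norms) →
      (∀ p ∈ L, p.1 ∈ norms) →
      L.Pairwise (fun a b => PySem.Str.len b.1 ≤ PySem.Str.len a.1) →
      (∀ m ∈ norms, (∀ m' ∈ norms, ¬ PDom m m') →
          (∃ q ∈ acc, q.1 = m) ∨ (∃ p ∈ L, p.1 = m)) →
      L.foldl stepA acc = acc ++ L.filter (fun p => goodb norms p.1) := by
  intro L
  induction L with
  | nil => intro acc _ _ _ _; simp
  | cons n L' ih =>
    intro acc hC1 hC4 hC3 hC2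
    have hsortTail : L'.Pairwise (fun a b => PySem.Str.len b.1 ≤ PySem.Str.len a.1) :=
      (List.pairwise_cons.1 hC3).2
    have hheadGe : ∀ p ∈ L', PySem.Str.len p.1 ≤ PySem.Str.len n.1 :=
      (List.pairwise_cons.1 hC3).1
    have hanyeq : acc.any (fun q => PySem.Str.isIn n.1 q.1 && n.1 != q.1)
        = acc.any (fun q => decide (PySem.Str.len n.1 < PySem.Str.len q.1) && PySem.Str.isIn n.1 q.1) := by
      have hfun : (fun q : String × String => PySem.Str.isIn n.1 q.1 && n.1 != q.1)
          = (fun q : String × String => decide (PySem.Str.len n.1 < PySem.Str.len q.1) && PySem.Str.isIn n.1 q.1) :=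
        funext (fun q => propercond n.1 q.1)
      rw [hfun]
    by_cases hg : goodb norms n.1 = true
    · -- n is kept
      have hnotdom : ∀ m ∈ norms, ¬ PDom n.1 m := (goodb_iff norms n.1).1 hg
      have hany : acc.any (fun q => PySem.Str.isIn n.1 q.1 && n.1 != q.1) = false := by
        rw [hanyeq]
        apply List.any_eq_false.mpr
        intro q hq hcond
        rw [Bool.and_eq_true, decide_eq_true_eq] at hcond
        refine hnotdom q.1 (hC1 q hq) ⟨?_, (PySem.Str.isIn_iff_infix _ _).1 hcond.2⟩
        have := hcond.1
        rw [PySem.Str.len_eq, PySem.Str.len_eq] at this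
        exact_mod_cast this
      have hstep : stepA acc n = acc ++ [n] := by
        unfold stepA
        simp only [hany]
        simp
      rw [List.foldl_cons, hstep, ih (acc ++ [n])
        (by intro q hq
            rcases List.mem_append.1 hq with h | h
            · exact hC1 q h
            · rw [List.mem_singleton.1 h]; exact hC4 n List.mem_cons_self)
        (by intro p hp; exact hC4 p (List.mem_cons_of_mem _ hp))
        hsortTail
        (by intro m hm hgood
            rcases hC2 m hm hgood with ⟨q, hq, hq1⟩ | ⟨p, hp, hp1⟩
            · exact Or.inl ⟨q, List.mem_append_left _ hq, hq1⟩
            · rcases List.mem_cons.1 hp with rfl | hp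
              · exact Or.inl ⟨p, List.mem_append_right _ (List.mem_singleton.2 rfl), hp1⟩
              · exact Or.inr ⟨p, hp, hp1⟩)]
      simp [hg, List.append_assoc]
    · -- n is dominated
      have hex : ∃ m ∈ norms, PDom n.1 m := by
        by_contra hno
        push Not at hno
        exact hg ((goodb_iff norms n.1).2 hno)
      obtain ⟨m', hm'N, hm'D, hm'good⟩ := exists_undominated_superstring norms n.1 hex
      have hm'acc : ∃ q ∈ acc, q.1 = m' := by
        rcases hC2 m' hm'N hm'good with h | ⟨p, hp, hp1⟩
        · exact h
        · exfalso
          rcases List.mem_cons.1 hp with rfl | hp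
          · rw [hp1] at hm'D
            exact Nat.lt_irrefl _ hm'D.1
          · have hle : PySem.Str.len p.1 ≤ PySem.Str.len n.1 := hheadGe p hp
            rw [hp1, PySem.Str.len_eq, PySem.Str.len_eq] at hle
            have hle' : m'.toList.length ≤ n.1.toList.length := by exact_mod_cast hle
            exact Nat.lt_irrefl _ (Nat.lt_of_lt_of_le hm'D.1 hle')
      have hany : acc.any (fun q => PySem.Str.isIn n.1 q.1 && n.1 != q.1) = true := by
        rw [hanyeq]
        apply List.any_eq_true.mpr
        obtain ⟨q, hq, hq1⟩ := hm'acc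
        refine ⟨q, hq, ?_⟩
        rw [Bool.and_eq_true, decide_eq_true_eq, hq1]
        refine ⟨?_, (PySem.Str.isIn_iff_infix _ _).2 hm'D.2⟩
        rw [PySem.Str.len_eq, PySem.Str.len_eq]
        exact_mod_cast hm'D.1
      have hstep : stepA acc n = acc := by
        unfold stepA
        simp only [hany]
        simp
      rw [List.foldl_cons, hstep, ih acc hC1
        (by intro p hp; exact hC4 p (List.mem_cons_of_mem _ hp))
        hsortTail
        (by intro m hm hgood
            rcases hC2 m hm hgood with h | ⟨p, hp, hp1⟩
            · exact Or.inl h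
            · rcases List.mem_cons.1 hp with rfl | hp
              · exact absurd hm'D (by rw [hp1]; exact hgood m' hm'N)
              · exact Or.inr ⟨p, hp, hp1⟩)]
      have hgf : goodb norms n.1 = false := Bool.not_eq_true _ |>.mp hg
      simp [hgf]

-- ===== VERDICT (by name: the statement is the Claim_ definition above) =====
theorem deduplicate_overlapping_py_spec : Claim_equal_deduplicate_overlapping_py := by
  intro fragments _
  unfold Spec_deduplicate_overlapping_py deduplicate_overlapping_py deduplicate_overlapping_py_alt
  simp only []
  set pairs := fragments.map (fun f => (PySem.Str.join " " (PySem.Str.split₀ f), f)) with hpairs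
  set norms := pairs.map (fun p => p.1) with hnorms
  set L := PySem.List.sorted pairs (fun x => PySem.Str.len x.1) true with hL
  have hmemL : ∀ p, p ∈ L ↔ p ∈ pairs := fun p => PySem.List.mem_sorted pairs _ true p
  have hloop := loop_eq norms L []
    (by intro q hq; simp at hq)
    (by intro p hp; exact List.mem_map.2 ⟨p, (hmemL p).1 hp, rfl⟩)
    (PySem.List.sorted_pairwise_rev pairs _)
    (by intro m hm _
        obtain ⟨p, hp, rfl⟩ := List.mem_map.1 hm
        exact Or.inr ⟨p, (hmemL p).2 hp, rfl⟩)
  have : L.foldl stepA [] = L.filter (fun p => goodb norms p.1) := by simpa using hloop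
  show (L.foldl stepA []).map (fun q => q.2) = _
  rw [this]
  rfl
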